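-- pv_equiv track=rewrite | github.com/srutherford2000/advent_of_code_2023 | 12_01/12_01.py | calibrate_values_with_written
-- ===== SOURCE A (Python) =====
-- valid_digits = {"zero":0, "one":1, "two":2, "three":3, "four":4,
--                 "five":5, "six":6, "seven":7, "eight":8, "nine":9}
--
-- def calibrate_values_no_written(input_data):
--     calibrated_info = []
--     for input_str in input_data:
--
--         first_info = (None, None)
--         last_info = (None, None)
--
--         for num in valid_digits.values():
--             try:
--                 first_ind = input_str.index(str(num))
--                 last_ind = input_str.rindex(str(num))
--
--                 if (first_info[0] is None) or (first_ind < first_info[0]):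
--                     first_info = (first_ind, num)
--
--                 if (last_info[0] is None) or (last_ind > last_info[0]):
--                     last_info = (last_ind, num)
--
--             except ValueError:
--                 pass
--
--         calibrated_info.append([first_info, last_info])
--
--     return calibrated_info
--
-- def calibrate_values_with_written(input_data):
--     calibrated_info = []
--     number_calibrated_vals = calibrate_values_no_written(input_data)
--     for i,input_str in enumerate(input_data):
--         first_info = number_calibrated_vals[i][0]
--         last_info = number_calibrated_vals[i][1]
--
--         for written_num in valid_digits.keys():
--             try:
--                 first_ind = input_str.index(written_num)
--                 last_ind = input_str.rindex(written_num)
--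
--                 if (first_info[0] is None) or (first_ind < first_info[0]):
--                     first_info = (first_ind, valid_digits[written_num])
--
--                 if (last_info[0] is None) or (last_ind > last_info[0]):
--                     last_info = (last_ind, valid_digits[written_num])
--
--             except ValueError:
--                 pass
--
--         calibrated_info.append([first_info, last_info])
--
--     return calibrated_info
-- ===== SOURCE B (Python) =====
-- valid_digits = {"zero":0, "one":1, "two":2, "three":3, "four":4,
--                 "five":5, "six":6, "seven":7, "eight":8, "nine":9}
--
-- def calibrate_values_with_written(input_data):
--     tokens = [(str(val), val) for val in valid_digits.values()] \
--              + list(valid_digits.items())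
--     calibrated_info = []
--     for input_str in input_data:
--         first_info = (None, None)
--         last_info = (None, None)
--         for i in range(len(input_str)):
--             for tok, val in tokens:
--                 if input_str.startswith(tok, i):
--                     if first_info[0] is None:
--                         first_info = (i, val)
--                     last_info = (i, val)
--                     break
--         calibrated_info.append([first_info, last_info])
--     return calibrated_info
-- ===== Notes on version B (the rewrite author's own statement) =====
-- stated objective: alternative
-- what changed: Replaced the 20 per-token index/rindex scans with min/max bookkeeping by a single left-to-right pass over string positions that tests which token starts at each position and records the first and last hit.
import Mathlib
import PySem

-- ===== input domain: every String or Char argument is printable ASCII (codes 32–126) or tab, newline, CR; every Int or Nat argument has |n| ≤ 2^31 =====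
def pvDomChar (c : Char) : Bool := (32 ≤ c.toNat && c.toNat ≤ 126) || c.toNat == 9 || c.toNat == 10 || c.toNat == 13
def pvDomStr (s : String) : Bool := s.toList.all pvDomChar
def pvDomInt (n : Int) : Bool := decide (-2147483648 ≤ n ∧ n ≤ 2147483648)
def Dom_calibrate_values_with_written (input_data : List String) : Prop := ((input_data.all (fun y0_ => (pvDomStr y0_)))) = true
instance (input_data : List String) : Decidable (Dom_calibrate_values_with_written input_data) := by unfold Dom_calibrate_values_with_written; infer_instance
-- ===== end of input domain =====

-- B replaces the 20 per-token index/rindex scans by one left-to-right pass over positions,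
-- recording the first and last position where any token starts (objective: alternative).

-- ===== PORT A =====
-- the module-level dict valid_digits, in insertion order
def pvValidDigits : List (String × Int) :=
  [("zero",0),("one",1),("two",2),("three",3),("four",4),
   ("five",5),("six",6),("seven",7),("eight",8),("nine",9)]

-- body of A's inner loop over valid_digits.values(); input_str.index/rindex raise
-- ValueError exactly when find = -1, which the `except` turns into a skip
def pvStepNum (s : String)
    (st : (Option Int × Option Int) × (Option Int × Option Int)) (num : Int) :
    (Option Int × Option Int) × (Option Int × Option Int) :=
  let fi := PySem.Str.find s (PySem.Int.toStr num)
  if fi = -1 then st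
  else
    let la := PySem.Str.rfind s (PySem.Int.toStr num)
    let first := match st.1.1 with
      | none => (some fi, some num)
      | some j => if fi < j then (some fi, some num) else st.1
    let last := match st.2.1 with
      | none => (some la, some num)
      | some j => if j < la then (some la, some num) else st.2
    (first, last)

def calibrate_values_no_written (input_data : List String) :
    List (List (Option Int × Option Int)) :=
  input_data.foldl (fun acc input_str =>
    let st := (pvValidDigits.map (fun kv => kv.2)).foldl (pvStepNum input_str)
        ((none, none), (none, none))
    acc ++ [[st.1, st.2]]) []

-- body of the loop over valid_digits.keys(); valid_digits[written_num] is kv.2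
def pvStepWord (s : String)
    (st : (Option Int × Option Int) × (Option Int × Option Int)) (kv : String × Int) :
    (Option Int × Option Int) × (Option Int × Option Int) :=
  let fi := PySem.Str.find s kv.1
  if fi = -1 then st
  else
    let la := PySem.Str.rfind s kv.1
    let first := match st.1.1 with
      | none => (some fi, some kv.2)
      | some j => if fi < j then (some fi, some kv.2) else st.1
    let last := match st.2.1 with
      | none => (some la, some kv.2)
      | some j => if j < la then (some la, some kv.2) else st.2
    (first, last)

def calibrate_values_with_written (input_data : List String) :
    List (List (Option Int × Option Int)) :=
  let nums := calibrate_values_no_written input_data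
  (PySem.List.enumerate input_data).foldl (fun acc p =>
    let row := PySem.List.pyGetD nums p.1 []
    let first0 := PySem.List.pyGetD row 0 (none, none)
    let last0 := PySem.List.pyGetD row 1 (none, none)
    let st := pvValidDigits.foldl (pvStepWord p.2) (first0, last0)
    acc ++ [[st.1, st.2]]) []

-- ===== PORT B =====
-- tokens = [(str(val), val) for val in valid_digits.values()] + list(valid_digits.items())
def pvTokens : List (String × Int) :=
  pvValidDigits.map (fun kv => (PySem.Int.toStr kv.2, kv.2)) ++ pvValidDigits

-- one line of B: a single pass over positions; the inner for-with-break is find?;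
-- input_str.startswith(tok, i) is exact as "tok is a prefix of the char list dropped by i"
-- for the 0 ≤ i < len(input_str) produced by range
def pvLineB (input_str : String) : List (Option Int × Option Int) :=
  let cs := input_str.toList
  let st := (List.range cs.length).foldl (fun st i =>
      match pvTokens.find? (fun tv => PySem.Chars.startswith (cs.drop i) tv.1.toList) with
      | some tv =>
        let first := match st.1.1 with
          | none => (some (i : Int), some tv.2)
          | some _ => st.1
        (first, (some (i : Int), some tv.2))
      | none => st) ((none, none), (none, none))
  [st.1, st.2]

def calibrate_values_with_written_alt (input_data : List String) :
    List (List (Option Int × Option Int)) :=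
  input_data.foldl (fun acc input_str => acc ++ [pvLineB input_str]) []

-- ===== PRECONDITION & SPEC =====
def Spec_calibrate_values_with_written (input_data : List String) (out : List (List (Option Int × Option Int))) : Prop := out = calibrate_values_with_written_alt input_data
instance (input_data : List String) (out : List (List (Option Int × Option Int))) : Decidable (Spec_calibrate_values_with_written input_data out) := by unfold Spec_calibrate_values_with_written; infer_instance

-- ===== CLAIM (what is proved, stated in full; the proofs are below) =====
def Claim_equal_calibrate_values_with_written : Prop := ∀ (input_data : List String), Dom_calibrate_values_with_written input_data → Spec_calibrate_values_with_written input_data (calibrate_values_with_written input_data)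

-- ===== LEMMAS AND PROOFS =====

-- char-level version of A's loop body (Str.find/rfind are wrappers over Chars.find/rfind)
def pvChStep (cs : List Char)
    (st : (Option Int × Option Int) × (Option Int × Option Int)) (tv : List Char × Int) :
    (Option Int × Option Int) × (Option Int × Option Int) :=
  let fi := PySem.Chars.find cs tv.1
  if fi = -1 then st
  else
    let la := PySem.Chars.rfind cs tv.1
    let first := match st.1.1 with
      | none => (some fi, some tv.2)
      | some j => if fi < j then (some fi, some tv.2) else st.1
    let last := match st.2.1 with
      | none => (some la, some tv.2)
      | some j => if j < la then (some la, some tv.2) else st.2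
    (first, last)

-- B's loop body, named for the proofs (pvLineB's lambda is definitionally this)
def pvStepB (cs : List Char)
    (st : (Option Int × Option Int) × (Option Int × Option Int)) (i : Nat) :
    (Option Int × Option Int) × (Option Int × Option Int) :=
  match pvTokens.find? (fun tv => PySem.Chars.startswith (cs.drop i) tv.1.toList) with
  | some tv =>
    let first := match st.1.1 with
      | none => (some (i : Int), some tv.2)
      | some _ => st.1
    (first, (some (i : Int), some tv.2))
  | none => st

-- the token table at char level
def pvToksL : List (List Char × Int) := pvTokens.map (fun tv => (tv.1.toList, tv.2))

-- which value (if any) the token list ts matches at position i of cs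
def pvMAt (ts : List (List Char × Int)) (cs : List Char) (i : Nat) : Option Int :=
  (ts.find? (fun tv => PySem.Chars.startswith (cs.drop i) tv.1)).map (fun tv => tv.2)

-- "o is the first match of ts in cs among positions < k"
def pvFirstT (ts : List (List Char × Int)) (cs : List Char) (k : Nat)
    (o : Option Int × Option Int) : Prop :=
  (o = (none, none) ∧ ∀ i < k, pvMAt ts cs i = none) ∨
  (∃ i v, i < k ∧ o = (some (i : Int), some v) ∧ pvMAt ts cs i = some v ∧
     ∀ j < i, pvMAt ts cs j = none)

-- "o is the last match of ts in cs among positions < k"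
def pvLastT (ts : List (List Char × Int)) (cs : List Char) (k : Nat)
    (o : Option Int × Option Int) : Prop :=
  (o = (none, none) ∧ ∀ i < k, pvMAt ts cs i = none) ∨
  (∃ i v, i < k ∧ o = (some (i : Int), some v) ∧ pvMAt ts cs i = some v ∧
     ∀ j, i < j → j < k → pvMAt ts cs j = none)

lemma pvToks_ne_nil : ∀ tv ∈ pvToksL, tv.1 ≠ [] := by decide

lemma pvToks_nodup : pvToksL.Nodup := by decide

lemma pvToks_prefix_uniq : ∀ t1 ∈ pvToksL, ∀ t2 ∈ pvToksL, t1.1 <+: t2.1 → t1 = t2 := by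
  decide

-- at most one token of pvToksL starts at a given position
lemma pvMatch_uniq {t1 t2 : List Char × Int} {d : List Char}
    (h1 : t1 ∈ pvToksL) (h2 : t2 ∈ pvToksL) (p1 : t1.1 <+: d) (p2 : t2.1 <+: d) :
    t1 = t2 := by
  rcases List.prefix_or_prefix_of_prefix p1 p2 with h | h
  · exact pvToks_prefix_uniq t1 h1 t2 h2 h
  · exact (pvToks_prefix_uniq t2 h2 t1 h1 h).symm

lemma pvFirstT_unique {ts : List (List Char × Int)} {cs : List Char} {k : Nat}
    {o1 o2 : Option Int × Option Int} (h1 : pvFirstT ts cs k o1)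
    (h2 : pvFirstT ts cs k o2) : o1 = o2 := by
  rcases h1 with ⟨e1, n1⟩ | ⟨i1, v1, hk1, e1, m1, min1⟩ <;>
    rcases h2 with ⟨e2, n2⟩ | ⟨i2, v2, hk2, e2, m2, min2⟩
  · rw [e1, e2]
  · exact absurd m2 (by simp [n1 i2 hk2])
  · exact absurd m1 (by simp [n2 i1 hk1])
  · rcases lt_trichotomy i1 i2 with h | h | h
    · exact absurd m1 (by simp [min2 i1 h])
    · subst h
      have hv := m1.symm.trans m2
      simp only [Option.some.injEq] at hv
      rw [e1, e2, hv]
    · exact absurd m2 (by simp [min1 i2 h])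

lemma pvLastT_unique {ts : List (List Char × Int)} {cs : List Char} {k : Nat}
    {o1 o2 : Option Int × Option Int} (h1 : pvLastT ts cs k o1)
    (h2 : pvLastT ts cs k o2) : o1 = o2 := by
  rcases h1 with ⟨e1, n1⟩ | ⟨i1, v1, hk1, e1, m1, max1⟩ <;>
    rcases h2 with ⟨e2, n2⟩ | ⟨i2, v2, hk2, e2, m2, max2⟩
  · rw [e1, e2]
  · exact absurd m2 (by simp [n1 i2 hk2])
  · exact absurd m1 (by simp [n2 i1 hk1])
  · rcases lt_trichotomy i1 i2 with h | h | h
    · exact absurd m2 (by simp [max1 i2 h hk2])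
    · subst h
      have hv := m1.symm.trans m2
      simp only [Option.some.injEq] at hv
      rw [e1, e2, hv]
    · exact absurd m1 (by simp [max2 i1 h hk1])

-- a prefix at a position of a nonempty token sits strictly inside cs
lemma pvPos_lt_len {cs sub : List Char} (hne : sub ≠ []) {i : Nat}
    (h : sub <+: cs.drop i) : i < cs.length := by
  by_contra hc
  rw [Nat.not_lt] at hc
  rw [List.drop_eq_nil_of_le hc] at h
  exact hne (List.prefix_nil.mp h)

-- rfind.go scans j = k, k-1, …, 0 and returns the first j where sub starts
lemma pvRfindGo_some (s sub : List Char) :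
    ∀ k : Nat, (∃ j, j ≤ k ∧ sub <+: s.drop j) →
    ∃ r : Nat, PySem.Chars.rfind.go s sub k = (r : Int) ∧ r ≤ k ∧ sub <+: s.drop r ∧
      ∀ j, r < j → j ≤ k → ¬ sub <+: s.drop j := by
  intro k
  induction k with
  | zero =>
    rintro ⟨j, hj, hp⟩
    interval_cases j
    refine ⟨0, ?_, le_rfl, hp, by omega⟩
    simp only [PySem.Chars.rfind.go]
    rw [if_pos (List.isPrefixOf_iff_prefix.mpr (by simpa using hp))]
    norm_num
  | succ k ih =>
    rintro ⟨j, hj, hp⟩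
    by_cases htop : sub <+: s.drop (k+1)
    · refine ⟨k+1, ?_, le_rfl, htop, by omega⟩
      simp only [PySem.Chars.rfind.go]
      rw [if_pos (List.isPrefixOf_iff_prefix.mpr htop)]
    · have hj' : j ≤ k := by
        rcases Nat.lt_succ_iff_lt_or_eq.mp (Nat.lt_succ_of_le hj) with h | h
        · omega
        · exact absurd (h ▸ hp) htop
      obtain ⟨r, hr, hrk, hrp, hrmax⟩ := ih ⟨j, hj', hp⟩
      refine ⟨r, ?_, by omega, hrp, ?_⟩
      · simp only [PySem.Chars.rfind.go]
        rw [if_neg (by simpa [List.isPrefixOf_iff_prefix] using htop)]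
        exact hr
      · intro j' h1 h2
        rcases Nat.lt_succ_iff_lt_or_eq.mp (Nat.lt_succ_of_le h2) with h | h
        · exact hrmax j' h1 (by omega)
        · exact h ▸ htop

-- Chars.rfind points at the LAST occurrence
lemma pvRfind_spec {cs sub : List Char} (hne : sub ≠ []) {f : Nat}
    (hocc : sub <+: cs.drop f) :
    ∃ r : Nat, PySem.Chars.rfind cs sub = (r : Int) ∧ r < cs.length ∧
      sub <+: cs.drop r ∧ ∀ j, r < j → ¬ sub <+: cs.drop j := by
  obtain ⟨r, hr, hrk, hrp, hrmax⟩ :=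
    pvRfindGo_some cs sub cs.length ⟨f, (pvPos_lt_len hne hocc).le, hocc⟩
  refine ⟨r, hr, pvPos_lt_len hne hrp, hrp, ?_⟩
  intro j hj hp
  by_cases hjl : j ≤ cs.length
  · exact hrmax j hj hjl hp
  · exact absurd (pvPos_lt_len hne hp) (by omega)

-- Chars.find points at the FIRST occurrence, as a Nat
lemma pvFind_spec {cs sub : List Char} (hne : sub ≠ [])
    (h : PySem.Chars.find cs sub ≠ -1) :
    ∃ f : Nat, PySem.Chars.find cs sub = (f : Int) ∧ f < cs.length ∧
      sub <+: cs.drop f ∧ ∀ j < f, ¬ sub <+: cs.drop j := by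
  have h0 : 0 ≤ PySem.Chars.find cs sub := by
    have := PySem.Chars.neg_one_le_find cs sub
    omega
  obtain ⟨hp, hmin⟩ := PySem.Chars.find_spec h0
  refine ⟨(PySem.Chars.find cs sub).toNat, (Int.toNat_of_nonneg h0).symm,
    pvPos_lt_len hne hp, hp, hmin⟩

-- find = -1 means the token starts nowhere
lemma pvFind_none {cs sub : List Char} (h : PySem.Chars.find cs sub = -1) :
    ∀ i, ¬ sub <+: cs.drop i := by
  intro i hp
  exact (PySem.Chars.find_eq_neg_one_iff cs sub).mp h
    (hp.isInfix.trans (List.drop_suffix i cs).isInfix)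

lemma pvMAt_some_elim {ts : List (List Char × Int)} {cs : List Char} {i : Nat} {v : Int}
    (h : pvMAt ts cs i = some v) : ∃ u ∈ ts, u.1 <+: cs.drop i ∧ u.2 = v := by
  unfold pvMAt at h
  obtain ⟨u, hu, hv⟩ := Option.map_eq_some_iff.mp h
  have hpred := List.find?_some hu
  simp only [] at hpred
  exact ⟨u, List.mem_of_find?_eq_some hu,
    (PySem.Chars.startswith_iff _ _).mp hpred, hv⟩

lemma pvMAt_append {ts : List (List Char × Int)} {t : List Char × Int}
    (hsub : (ts ++ [t]).Sublist pvToksL) (cs : List Char) (i : Nat) :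
    pvMAt (ts ++ [t]) cs i =
      if t.1 <+: cs.drop i then some t.2 else pvMAt ts cs i := by
  have htmem : t ∈ pvToksL := hsub.subset (by simp)
  have hnd : (ts ++ [t]).Nodup := pvToks_nodup.sublist hsub
  have htnot : t ∉ ts := by
    simp only [List.nodup_append] at hnd
    intro hc
    exact hnd.2.2 t hc t (List.mem_singleton_self t) rfl
  unfold pvMAt
  rw [List.find?_append]
  by_cases hp : t.1 <+: cs.drop i
  · have hts : ts.find? (fun tv => PySem.Chars.startswith (cs.drop i) tv.1) = none := by
      rw [List.find?_eq_none]
      intro u hu hsw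
      have hu2 : u ∈ pvToksL := hsub.subset (List.mem_append_left _ hu)
      have := pvMatch_uniq hu2 htmem ((PySem.Chars.startswith_iff _ _).mp hsw) hp
      exact htnot (this ▸ hu)
    rw [hts, if_pos hp]
    simp [List.find?, (PySem.Chars.startswith_iff (cs.drop i) t.1).mpr hp]
  · have hf : PySem.Chars.startswith (cs.drop i) t.1 = false := by
      rw [Bool.eq_false_iff]
      intro hc
      exact hp ((PySem.Chars.startswith_iff _ _).mp hc)
    rw [if_neg hp]
    cases hts : ts.find? (fun tv => PySem.Chars.startswith (cs.drop i) tv.1) <;>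
      simp [List.find?, hf]


-- invariant of A's token fold
lemma pvA_inv : ∀ (ts : List (List Char × Int)), ts.Sublist pvToksL → ∀ (cs : List Char),
    pvFirstT ts cs cs.length ((ts.foldl (pvChStep cs) ((none,none),(none,none))).1) ∧
    pvLastT ts cs cs.length ((ts.foldl (pvChStep cs) ((none,none),(none,none))).2) := by
  intro ts
  induction ts using List.reverseRecOn with
  | nil =>
    intro _ cs
    constructor <;> exact Or.inl ⟨rfl, fun i _ => rfl⟩
  | append_singleton ts t ih =>
    intro hsub cs
    have hsub' : ts.Sublist pvToksL := ((List.prefix_append ts [t]).sublist).trans hsub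
    obtain ⟨hF, hL⟩ := ih hsub' cs
    have htmem : t ∈ pvToksL := hsub.subset (by simp)
    have htne : t.1 ≠ [] := pvToks_ne_nil t htmem
    have htnot : t ∉ ts := by
      have hnd : (ts ++ [t]).Nodup := pvToks_nodup.sublist hsub
      simp only [List.nodup_append] at hnd
      intro hc
      exact hnd.2.2 t hc t (List.mem_singleton_self t) rfl
    have hApp := pvMAt_append hsub cs
    rw [List.foldl_append, List.foldl_cons, List.foldl_nil]
    set st := ts.foldl (pvChStep cs) ((none,none),(none,none)) with hst
    by_cases hfind : PySem.Chars.find cs t.1 = -1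
    · have hstep : pvChStep cs st t = st := by
        unfold pvChStep
        rw [if_pos hfind]
      rw [hstep]
      have hpt : ∀ i, pvMAt (ts ++ [t]) cs i = pvMAt ts cs i := fun i => by
        rw [hApp i, if_neg (pvFind_none hfind i)]
      constructor
      · unfold pvFirstT at hF ⊢
        simp only [hpt]
        exact hF
      · unfold pvLastT at hL ⊢
        simp only [hpt]
        exact hL
    · obtain ⟨f, hfeq, hflt, hfpre, hfmin⟩ := pvFind_spec htne hfind
      obtain ⟨r, hreq, hrlt, hrpre, hrmax⟩ := pvRfind_spec htne hfpre
      have hclash : ∀ {i : Nat} {v : Int},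
          pvMAt ts cs i = some v → t.1 <+: cs.drop i → False := by
        intro i v hm hp
        obtain ⟨u, hu, hup, _⟩ := pvMAt_some_elim hm
        have := pvMatch_uniq (hsub'.subset hu) htmem hup hp
        exact htnot (this ▸ hu)
      have hstep : pvChStep cs st t =
          ((match st.1.1 with
            | none => (some (f : Int), some t.2)
            | some j => if (f : Int) < j then (some (f : Int), some t.2) else st.1),
           (match st.2.1 with
            | none => (some (r : Int), some t.2)
            | some j => if j < (r : Int) then (some (r : Int), some t.2) else st.2)) := by
        unfold pvChStep
        rw [if_neg hfind, hfeq, hreq]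
      rw [hstep]
      constructor
      · rcases hF with ⟨e, hn⟩ | ⟨i, v, hik, e, hm, hmin⟩
        · rw [e]
          refine Or.inr ⟨f, t.2, hflt, rfl, ?_, fun j hj => ?_⟩
          · rw [hApp f, if_pos hfpre]
          · rw [hApp j, if_neg (hfmin j hj)]
            exact hn j (hj.trans hflt)
        · rw [e]
          dsimp only
          by_cases hfi : f < i
          · rw [if_pos (by exact_mod_cast hfi)]
            refine Or.inr ⟨f, t.2, hflt, rfl, ?_, fun j hj => ?_⟩
            · rw [hApp f, if_pos hfpre]
            · rw [hApp j, if_neg (hfmin j hj)]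
              exact hmin j (hj.trans hfi)
          · have hne2 : i ≠ f := fun h => hclash hm (h ▸ hfpre)
            have hif : i < f := by omega
            rw [if_neg (by exact_mod_cast hfi)]
            refine Or.inr ⟨i, v, hik, rfl, ?_, fun j hj => ?_⟩
            · rw [hApp i, if_neg (hfmin i hif)]
              exact hm
            · rw [hApp j, if_neg (hfmin j (hj.trans hif))]
              exact hmin j hj
      · rcases hL with ⟨e, hn⟩ | ⟨i, v, hik, e, hm, hmax⟩
        · rw [e]
          refine Or.inr ⟨r, t.2, hrlt, rfl, ?_, fun j h1 h2 => ?_⟩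
          · rw [hApp r, if_pos hrpre]
          · rw [hApp j, if_neg (hrmax j h1)]
            exact hn j h2
        · rw [e]
          dsimp only
          by_cases hir : i < r
          · rw [if_pos (by exact_mod_cast hir)]
            refine Or.inr ⟨r, t.2, hrlt, rfl, ?_, fun j h1 h2 => ?_⟩
            · rw [hApp r, if_pos hrpre]
            · rw [hApp j, if_neg (hrmax j h1)]
              exact hmax j (hir.trans h1) h2
          · have hne2 : i ≠ r := fun h => hclash hm (h ▸ hrpre)
            have hri : r < i := by omega
            rw [if_neg (by exact_mod_cast hir)]
            refine Or.inr ⟨i, v, hik, rfl, ?_, fun j h1 h2 => ?_⟩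
            · rw [hApp i, if_neg (hrmax i hri)]
              exact hm
            · rw [hApp j, if_neg (hrmax j (hri.trans h1))]
              exact hmax j h1 h2

-- pvMAt over the full table, phrased as B's find? over pvTokens
lemma pvMAt_toksL (cs : List Char) (i : Nat) :
    pvMAt pvToksL cs i =
      (pvTokens.find? (fun tv => PySem.Chars.startswith (cs.drop i) tv.1.toList)).map
        (fun tv => tv.2) := by
  unfold pvMAt pvToksL
  rw [List.find?_map, Option.map_map]
  rfl

-- invariant of B's positional fold
lemma pvB_inv : ∀ (cs : List Char) (k : Nat),
    pvFirstT pvToksL cs k (((List.range k).foldl (pvStepB cs) ((none,none),(none,none))).1) ∧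
    pvLastT pvToksL cs k (((List.range k).foldl (pvStepB cs) ((none,none),(none,none))).2) := by
  intro cs k
  induction k with
  | zero =>
    exact ⟨Or.inl ⟨rfl, by omega⟩, Or.inl ⟨rfl, by omega⟩⟩
  | succ k ih =>
    obtain ⟨hF, hL⟩ := ih
    rw [List.range_succ, List.foldl_append]
    set st := (List.range k).foldl (pvStepB cs) ((none,none),(none,none)) with hst
    simp only [List.foldl_cons, List.foldl_nil]
    have hmat := pvMAt_toksL cs k
    unfold pvStepB
    cases hfd : pvTokens.find? (fun tv => PySem.Chars.startswith (cs.drop k) tv.1.toList) with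
    | none =>
      have hm0 : pvMAt pvToksL cs k = none := by rw [hmat, hfd]; rfl
      dsimp only []
      constructor
      · rcases hF with ⟨e, hn⟩ | ⟨i, v, hik, e, hm, hmin⟩
        · refine Or.inl ⟨e, fun i hi => ?_⟩
          rcases Nat.lt_succ_iff_lt_or_eq.mp hi with h | h
          · exact hn i h
          · exact h ▸ hm0
        · exact Or.inr ⟨i, v, Nat.lt_succ_of_lt hik, e, hm, hmin⟩
      · rcases hL with ⟨e, hn⟩ | ⟨i, v, hik, e, hm, hmax⟩
        · refine Or.inl ⟨e, fun i hi => ?_⟩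
          rcases Nat.lt_succ_iff_lt_or_eq.mp hi with h | h
          · exact hn i h
          · exact h ▸ hm0
        · refine Or.inr ⟨i, v, Nat.lt_succ_of_lt hik, e, hm, fun j h1 h2 => ?_⟩
          rcases Nat.lt_succ_iff_lt_or_eq.mp h2 with h | h
          · exact hmax j h1 h
          · exact h ▸ hm0
    | some tv =>
      have hm0 : pvMAt pvToksL cs k = some tv.2 := by rw [hmat, hfd]; rfl
      dsimp only []
      constructor
      · rcases hF with ⟨e, hn⟩ | ⟨i, v, hik, e, hm, hmin⟩
        · rw [e]
          exact Or.inr ⟨k, tv.2, Nat.lt_succ_self k, rfl, hm0, fun j hj => hn j hj⟩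
        · rw [e]
          exact Or.inr ⟨i, v, Nat.lt_succ_of_lt hik, rfl, hm, hmin⟩
      · exact Or.inr ⟨k, tv.2, Nat.lt_succ_self k, rfl, hm0, fun j h1 h2 => by omega⟩

-- A's combined digits-then-words fold for one string, as one fold over pvToksL
lemma pvA_row (s : String) :
    pvValidDigits.foldl (pvStepWord s)
      ((pvValidDigits.map (fun kv => kv.2)).foldl (pvStepNum s) ((none,none),(none,none)))
    = pvToksL.foldl (pvChStep s.toList) ((none,none),(none,none)) := by
  unfold pvToksL pvTokens
  rw [List.map_append, List.foldl_append, List.map_map, List.foldl_map,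
    List.foldl_map, List.foldl_map]
  rfl

-- per-string rows of A (digit pass only, and full) and the per-string claim
def pvRowD (s : String) : List (Option Int × Option Int) :=
  [((pvValidDigits.map (fun kv => kv.2)).foldl (pvStepNum s) ((none,none),(none,none))).1,
   ((pvValidDigits.map (fun kv => kv.2)).foldl (pvStepNum s) ((none,none),(none,none))).2]

def pvRowA (s : String) : List (Option Int × Option Int) :=
  [(pvToksL.foldl (pvChStep s.toList) ((none,none),(none,none))).1,
   (pvToksL.foldl (pvChStep s.toList) ((none,none),(none,none))).2]

-- the per-string equivalence
lemma pvLine_eq (s : String) : pvRowA s = pvLineB s := by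
  have hB : pvLineB s =
      [((List.range s.toList.length).foldl (pvStepB s.toList) ((none,none),(none,none))).1,
       ((List.range s.toList.length).foldl (pvStepB s.toList) ((none,none),(none,none))).2] := rfl
  obtain ⟨hFA, hLA⟩ := pvA_inv pvToksL (List.Sublist.refl _) s.toList
  obtain ⟨hFB, hLB⟩ := pvB_inv s.toList s.toList.length
  rw [hB]
  unfold pvRowA
  rw [pvFirstT_unique hFA hFB, pvLastT_unique hLA hLB]

lemma pvNoWritten_eq (l : List String) :
    calibrate_values_no_written l = l.map pvRowD := by
  have h := PySem.List.foldl_append_singleton_eq_map pvRowD l []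
  rw [List.nil_append] at h
  exact h

-- top-level glue for A's enumerate/indexing loop
lemma pvGlue_aux (nums : List (List (Option Int × Option Int))) :
    ∀ (l : List String) (pre : List (List (Option Int × Option Int)))
      (acc : List (List (Option Int × Option Int))),
    nums = pre ++ l.map pvRowD →
    (PySem.List.enumerate l (pre.length : Int)).foldl (fun acc p =>
      let row := PySem.List.pyGetD nums p.1 []
      let first0 := PySem.List.pyGetD row 0 (none, none)
      let last0 := PySem.List.pyGetD row 1 (none, none)
      let st := pvValidDigits.foldl (pvStepWord p.2) (first0, last0)
      acc ++ [[st.1, st.2]]) acc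
    = acc ++ l.map pvRowA := by
  intro l
  induction l with
  | nil =>
    intro pre acc h
    simp [PySem.List.enumerate]
  | cons s t ih =>
    intro pre acc h
    rw [show PySem.List.enumerate (s :: t) (pre.length : Int) =
      ((pre.length : Int), s) :: PySem.List.enumerate t ((pre.length : Int) + 1) from rfl]
    rw [List.foldl_cons]
    have hrow : PySem.List.pyGetD nums ((pre.length : Nat) : Int) [] = pvRowD s := by
      rw [h, PySem.List.pyGetD_natCast]
      simp [List.getD]
    have hbody : (let row := PySem.List.pyGetD nums (((pre.length : Int)), s).1 []
        let first0 := PySem.List.pyGetD row 0 (none, none)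
        let last0 := PySem.List.pyGetD row 1 (none, none)
        let st := pvValidDigits.foldl (pvStepWord (((pre.length : Int)), s).2) (first0, last0)
        acc ++ [[st.1, st.2]]) = acc ++ [pvRowA s] := by
      dsimp only
      rw [hrow]
      show acc ++ [[(pvValidDigits.foldl (pvStepWord s)
          ((pvValidDigits.map (fun kv => kv.2)).foldl (pvStepNum s) ((none,none),(none,none)))).1,
        (pvValidDigits.foldl (pvStepWord s)
          ((pvValidDigits.map (fun kv => kv.2)).foldl (pvStepNum s) ((none,none),(none,none)))).2]]
        = acc ++ [pvRowA s]
      rw [pvA_row]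
      rfl
    rw [hbody]
    have hstart : ((pre.length : Int) + 1) = (((pre ++ [pvRowD s]).length : Nat) : Int) := by
      simp
    rw [hstart]
    have h' : nums = (pre ++ [pvRowD s]) ++ t.map pvRowD := by
      rw [h]
      simp
    rw [ih (pre ++ [pvRowD s]) (acc ++ [pvRowA s]) h']
    simp

lemma pvGlue (l : List String) :
    calibrate_values_with_written l = l.map pvRowA := by
  have h := pvGlue_aux (calibrate_values_no_written l) l [] []
    (by rw [pvNoWritten_eq]; rfl)
  rw [List.nil_append] at h
  exact h

-- ===== VERDICT (by name: the statement is the Claim_ definition above) =====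
theorem calibrate_values_with_written_spec : Claim_equal_calibrate_values_with_written := by
  intro input_data _
  unfold Spec_calibrate_values_with_written
  rw [pvGlue]
  unfold calibrate_values_with_written_alt
  rw [PySem.List.foldl_append_singleton_eq_map]
  rw [List.nil_append]
  exact List.map_congr_left (fun s _ => pvLine_eq s)
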